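-- pv_equiv track=rewrite | github.com/oldnordic/ai-coder-assistant | src/frontend/ui/pr_tab_widgets.py | format_issues_by_type
-- ===== SOURCE A (Python) =====
-- from typing import List, Dict, Any, Optional
--
-- def format_issues_by_type(issues: List[Dict]) -> str:
--     """Format issues by type."""
--     type_counts = {}
--     for issue in issues:
--         issue_type = issue.get('issue_type', 'unknown')
--         type_counts[issue_type] = type_counts.get(issue_type, 0) + 1
--
--     result = []
--     for issue_type, count in sorted(type_counts.items()):
--         result.append(f"- {issue_type}: {count}")
--
--     return '\n'.join(result)
-- ===== SOURCE B (Python) =====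
-- def format_issues_by_type(issues):
--     """Format issues by type: sort all type keys once, then one run-length scan."""
--     keys = sorted(issue.get('issue_type', 'unknown') for issue in issues)
--     lines = []
--     i = 0
--     n = len(keys)
--     while i < n:
--         k = keys[i]
--         j = i + 1
--         while j < n and keys[j] == k:
--             j += 1
--         lines.append(f"- {k}: {j - i}")
--         i = j
--     return '\n'.join(lines)
-- ===== Notes on version B (the rewrite author's own statement) =====
-- stated objective: alternative
-- what changed: Replaces the dict-accumulate-then-sort-keys strategy with extract-keys, sort them all, and one run-length scan over the sorted key list.
import Mathlib
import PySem

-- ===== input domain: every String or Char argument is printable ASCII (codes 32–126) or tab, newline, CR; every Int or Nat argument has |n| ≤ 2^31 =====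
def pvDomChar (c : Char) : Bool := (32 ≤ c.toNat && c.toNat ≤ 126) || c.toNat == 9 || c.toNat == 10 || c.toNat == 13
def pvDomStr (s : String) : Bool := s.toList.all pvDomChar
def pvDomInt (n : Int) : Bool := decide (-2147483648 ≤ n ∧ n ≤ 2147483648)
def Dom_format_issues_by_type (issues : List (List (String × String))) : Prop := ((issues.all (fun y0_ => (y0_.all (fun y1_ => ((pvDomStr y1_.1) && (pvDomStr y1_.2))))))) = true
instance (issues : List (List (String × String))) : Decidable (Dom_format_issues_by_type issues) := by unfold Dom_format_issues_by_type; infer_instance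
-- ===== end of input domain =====

-- B replaces A's dict-accumulate-then-sort-keys by sort-all-keys-then-one-run-length-scan (alternative decomposition, same result).

-- ===== PORT A =====
def format_issues_by_type (issues : List (List (String × String))) : String :=
  let type_counts := issues.foldl
    (fun d issue =>
      let issue_type := PySem.Dict.getD (PySem.Dict.mk issue) "issue_type" "unknown"
      d.insert issue_type (d.getD issue_type 0 + 1))
    (PySem.Dict.empty : PySem.Dict String Int)
  let result := (PySem.List.sorted2 type_counts.items (fun p => p.1) (fun p => p.2)).foldl
    (fun r p => r ++ ["- " ++ p.1 ++ ": " ++ PySem.Int.toStr p.2]) ([] : List String)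
  PySem.Str.join "\n" result

-- ===== PORT B =====
-- the run-length scan of Source B's while-loop over the sorted key list, as structural recursion
def fibt_runs : List String → List String
  | [] => []
  | k :: rest =>
    ("- " ++ k ++ ": " ++ PySem.Int.toStr (1 + ((rest.takeWhile (fun x => x == k)).length : Int)))
      :: fibt_runs (rest.dropWhile (fun x => x == k))
termination_by s => s.length
decreasing_by
  simp only [List.length_cons]
  exact Nat.lt_succ_of_le (List.length_dropWhile_le _ _)

def format_issues_by_type_alt (issues : List (List (String × String))) : String :=
  let keys := PySem.List.sorted
    (issues.map (fun issue => PySem.Dict.getD (PySem.Dict.mk issue) "issue_type" "unknown"))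
    (fun x => x)
  PySem.Str.join "\n" (fibt_runs keys)

-- ===== PRECONDITION & SPEC =====
def Spec_format_issues_by_type (issues : List (List (String × String))) (out : String) : Prop := out = format_issues_by_type_alt issues
instance (issues : List (List (String × String))) (out : String) : Decidable (Spec_format_issues_by_type issues out) := by unfold Spec_format_issues_by_type; infer_instance

-- ===== CLAIM (what is proved, stated in full; the proofs are below) =====
def Claim_equal_format_issues_by_type : Prop := ∀ (issues : List (List (String × String))), Dom_format_issues_by_type issues → Spec_format_issues_by_type issues (format_issues_by_type issues)

-- ===== LEMMAS AND PROOFS =====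

-- the canonical line for a key, given the multiset of keys
def fibtLine (ks : List String) (k : String) : String :=
  "- " ++ k ++ ": " ++ PySem.Int.toStr (ks.count k)

theorem fibt_foldl_append {α β : Type} (g : α → β) :
    ∀ (l : List α) (acc : List β),
      l.foldl (fun r p => r ++ [g p]) acc = acc ++ l.map g := by
  intro l
  induction l with
  | nil => simp
  | cons x t ih => intro acc; simp [List.foldl, ih]

theorem fibt_before_eq (c : String → Int) (a b : String) :
    (decide (a < b) || (!decide (b < a) && decide (c a < c b))) = decide (a < b) := by
  rcases lt_trichotomy a b with h | h | h
  · simp [h]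
  · subst h; simp
  · simp [h, not_lt_of_gt h]

theorem fibt_insertBy_map (c : String → Int) (x : String) :
    ∀ (l : List String),
      PySem.List.insertBy
        (fun p q : String × Int => decide (p.1 < q.1) || (!decide (q.1 < p.1) && decide (p.2 < q.2)))
        (x, c x) (l.map (fun k => (k, c k)))
      = (PySem.List.insertBy (fun a b : String => decide (a < b)) x l).map (fun k => (k, c k)) := by
  intro l
  induction l with
  | nil => simp [PySem.List.insertBy]
  | cons y t ih =>
    simp only [List.map_cons, PySem.List.insertBy]
    rw [show (decide (x < y) || (!decide (y < x) && decide (c x < c y))) = decide (x < y) from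
      fibt_before_eq c x y]
    by_cases h : x < y
    · rw [if_pos (decide_eq_true h), if_pos (decide_eq_true h)]
      rfl
    · rw [if_neg (by simpa using h), if_neg (by simpa using h), ih]
      rfl

theorem fibt_sorted2_map (c : String → Int) (os : List String) :
    PySem.List.sorted2 (os.map (fun k => (k, c k))) (fun p => p.1) (fun p => p.2)
    = (PySem.List.sorted os (fun x => x)).map (fun k => (k, c k)) := by
  show List.foldl _ ([] : List (String × Int)) _ = _
  rw [show PySem.List.sorted os (fun x => x)
      = List.foldl (fun acc x => PySem.List.insertBy (fun a b : String => decide (a < b)) x acc) [] os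
      from rfl]
  suffices h : ∀ (os : List String) (l : List String),
      List.foldl (fun acc p => PySem.List.insertBy
        (fun p q : String × Int => decide (p.1 < q.1) || (!decide (q.1 < p.1) && decide (p.2 < q.2)))
        p acc) (l.map (fun k => (k, c k))) (os.map (fun k => (k, c k)))
      = (List.foldl (fun acc x => PySem.List.insertBy (fun a b : String => decide (a < b)) x acc) l os).map
          (fun k => (k, c k)) by
    have := h os []
    simpa using this
  intro os
  induction os with
  | nil => intro l; simp
  | cons x t ih =>
    intro l
    simp only [List.map_cons, List.foldl_cons]
    rw [fibt_insertBy_map c x l, ih]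

theorem fibt_runs_eq : ∀ (s : List String), s.Pairwise (· ≤ ·) →
    fibt_runs s
      = (PySem.List.sorted (PySem.Set.ofList s) (fun x => x)).map (fun k => fibtLine s k) := by
  intro s
  induction s using fibt_runs.induct with
  | case1 => intro _; simp [fibt_runs, PySem.Set.ofList, PySem.List.sorted, fibtLine]
  | case2 k rest ih =>
    intro hpw
    have hk : ∀ x ∈ rest, k ≤ x := (List.pairwise_cons.mp hpw).1
    have hrest : rest.Pairwise (· ≤ ·) := (List.pairwise_cons.mp hpw).2
    set tw := rest.takeWhile (fun x => x == k) with htw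
    set dw := rest.dropWhile (fun x => x == k) with hdw
    have hsplit : tw ++ dw = rest := List.takeWhile_append_dropWhile
    have htwk : ∀ x ∈ tw, x = k := by
      intro x hx
      have := List.mem_takeWhile_imp hx
      exact eq_of_beq this
    have hdwlt : ∀ x ∈ dw, k < x := by
      have hpdw : dw.Pairwise (· ≤ ·) := List.Pairwise.sublist (List.dropWhile_sublist _) hrest
      intro x hx
      have hxr : x ∈ rest := by rw [← hsplit]; exact List.mem_append_right _ hx
      cases hdwe : dw with
      | nil => rw [hdwe] at hx; simp at hx
      | cons d dtl =>
        have hd : (d == k) = false := by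
          have := List.head?_dropWhile_not (fun x => x == k) rest
          rw [← hdw, hdwe] at this; simpa using this
        have hdk : d ≠ k := by intro h; rw [h] at hd; simp at hd
        have hkd : k < d := lt_of_le_of_ne (hk d (by rw [← hsplit, hdwe]; exact List.mem_append_right _ (by simp))) (Ne.symm hdk)
        rw [hdwe] at hx
        rcases List.mem_cons.mp hx with h | h
        · rw [h]; exact hkd
        · rw [hdwe] at hpdw
          exact lt_of_lt_of_le hkd ((List.pairwise_cons.mp hpdw).1 x h)
    have hdwne : ∀ x ∈ dw, x ≠ k := fun x hx h => absurd (hdwlt x hx) (by rw [h]; exact lt_irrefl k)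
    have hdwpw : dw.Pairwise (· ≤ ·) := List.Pairwise.sublist (List.dropWhile_sublist _) hrest
    -- the sorted distinct keys of k :: rest decompose as k :: sorted distinct keys of dw
    have hsortedset :
        PySem.List.sorted (PySem.Set.ofList (k :: rest)) (fun x => x)
        = k :: PySem.List.sorted (PySem.Set.ofList dw) (fun x => x) := by
      apply PySem.List.sorted_eq_of_perm_of_pairwise_lt
      · rw [List.perm_ext_iff_of_nodup]
        · intro a
          rw [List.mem_cons, PySem.List.mem_sorted, PySem.Set.mem_ofList, PySem.Set.mem_ofList,
            List.mem_cons]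
          constructor
          · rintro (h | h)
            · exact Or.inl h
            · exact Or.inr (by rw [← hsplit]; exact List.mem_append_right _ h)
          · rintro (h | h)
            · exact Or.inl h
            · rw [← hsplit] at h
              rcases List.mem_append.mp h with h | h
              · exact Or.inl (htwk a h)
              · exact Or.inr h
        · rw [List.nodup_cons]
          refine ⟨?_, (PySem.List.sorted_perm _ _ _).nodup_iff.mpr (PySem.Set.nodup_ofList _)⟩
          intro hmem
          rw [PySem.List.mem_sorted, PySem.Set.mem_ofList] at hmem
          exact hdwne k hmem rfl
        · exact PySem.Set.nodup_ofList _
      · rw [List.pairwise_cons]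
        refine ⟨?_, PySem.List.sorted_ofList_pairwise_lt dw⟩
        intro x hx
        exact hdwlt x (by rwa [PySem.List.mem_sorted, PySem.Set.mem_ofList] at hx)
    rw [fibt_runs, hsortedset, List.map_cons]
    congr 1
    · -- head line: 1 + tw.length = count of k in k :: rest
      have htwc : tw.count k = tw.length := by
        rw [List.count_eq_length]
        intro x hx
        exact (htwk x hx).symm ▸ rfl
      have hdwc : dw.count k = 0 := by
        rw [List.count_eq_zero]
        intro h; exact hdwne k h rfl
      have hcount : (k :: rest).count k = 1 + tw.length := by
        rw [← hsplit, List.count_cons, List.count_append, htwc, hdwc]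
        simp [Nat.add_comm]
      simp only [fibtLine, hcount, ← htw]
      simp only [Nat.cast_add, Nat.cast_one]
    · -- tail lines: counts in s restrict to counts in dw
      rw [ih hdwpw]
      apply List.map_congr_left
      intro j hj
      have hjdw : j ∈ dw := by rwa [PySem.List.mem_sorted, PySem.Set.mem_ofList] at hj
      have hjk : j ≠ k := hdwne j hjdw
      simp only [fibtLine]
      congr 2
      have htwc0 : tw.count j = 0 := by
        rw [List.count_eq_zero]
        intro h; exact hjk (htwk j h)
      rw [← hsplit, List.count_cons, List.count_append, htwc0]
      simp [Ne.symm hjk]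

-- ===== VERDICT (by name: the statement is the Claim_ definition above) =====
theorem format_issues_by_type_spec : Claim_equal_format_issues_by_type := by
  intro issues _
  show format_issues_by_type issues = format_issues_by_type_alt issues
  set keyOf : List (String × String) → String :=
    fun issue => PySem.Dict.getD (PySem.Dict.mk issue) "issue_type" "unknown" with hkeyOf
  set ks : List String := issues.map keyOf with hks
  set s : List String := PySem.List.sorted ks (fun x => x) with hs
  have hA : format_issues_by_type issues
      = PySem.Str.join "\n"
          ((PySem.List.sorted (PySem.Set.ofList ks) (fun x => x)).map (fun k => fibtLine ks k)) := by
    unfold format_issues_by_type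
    have hfold : issues.foldl
        (fun d issue =>
          let issue_type := PySem.Dict.getD (PySem.Dict.mk issue) "issue_type" "unknown"
          d.insert issue_type (d.getD issue_type 0 + 1))
        (PySem.Dict.empty : PySem.Dict String Int)
        = PySem.Dict.counter ks := by
      rw [← PySem.Dict.foldl_insert_getD_add_one_eq_counter ks, hks, List.foldl_map]
    simp only [hfold, PySem.Dict.items_counter, fibt_foldl_append, List.nil_append]
    rw [fibt_sorted2_map (fun k => (ks.count k : Int)) (PySem.Set.ofList ks), List.map_map]
    rfl
  have hpw : s.Pairwise (· ≤ ·) := by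
    have := PySem.List.sorted_pairwise ks (fun x => x) (κ := String)
    simpa using this
  have hperm : (PySem.Set.ofList s).Perm (PySem.Set.ofList ks) := by
    rw [List.perm_ext_iff_of_nodup (PySem.Set.nodup_ofList _) (PySem.Set.nodup_ofList _)]
    intro a
    rw [PySem.Set.mem_ofList, PySem.Set.mem_ofList, hs, PySem.List.mem_sorted]
  have hcount : ∀ j, s.count j = ks.count j := fun j =>
    (PySem.List.sorted_perm ks (fun x => x) false).count_eq j
  have hB : format_issues_by_type_alt issues
      = PySem.Str.join "\n"
          ((PySem.List.sorted (PySem.Set.ofList ks) (fun x => x)).map (fun k => fibtLine ks k)) := by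
    show PySem.Str.join "\n" (fibt_runs s) = _
    rw [fibt_runs_eq s hpw,
      PySem.List.sorted_eq_sorted_of_perm _ _ _ (fun a b h => h) hperm]
    congr 1
    apply List.map_congr_left
    intro j _
    simp only [fibtLine, hcount j]
  rw [hA, hB]
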